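-- pv_equiv track=rewrite | github.com/nuoxoxo/leetcode | leet_1291_sequential_digits.py | Bruteforce_TLE
-- ===== SOURCE A (Python) =====
-- from typing import List
--
-- def Bruteforce_TLE(low: int, high: int) -> List[int]:
--     def isSD(num: int) -> bool:
--         s = str(num)
--         for i in range(len(s) - 1):
--             if int(s[i + 1]) - int(s[i]) != 1:
--                 return False
--         return True
--     res = []
--     for n in range(low, high + 1):
--         if isSD(n):
--             res.append(n)
--     return res
-- ===== SOURCE B (Python) =====
-- from typing import List
--
-- def _candidates() -> List[int]:
--     # all sequential-digit numbers: single digits 0..9, then substrings of "123456789"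
--     s = "123456789"
--     cands = list(range(10))
--     for L in range(2, 10):
--         for i in range(10 - L):
--             cands.append(int(s[i:i + L]))
--     return cands
--
-- def Bruteforce_TLE(low: int, high: int) -> List[int]:
--     return [n for n in _candidates() if low <= n <= high]
-- ===== Notes on version B (the rewrite author's own statement) =====
-- stated objective: faster
-- what changed: Instead of testing every integer in [low, high] digit-by-digit via str(), B generates the 46 sequential-digit candidates once (digits 0-9 plus substrings of '123456789', produced already in ascending order) and filters them by the range.
import Mathlib
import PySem

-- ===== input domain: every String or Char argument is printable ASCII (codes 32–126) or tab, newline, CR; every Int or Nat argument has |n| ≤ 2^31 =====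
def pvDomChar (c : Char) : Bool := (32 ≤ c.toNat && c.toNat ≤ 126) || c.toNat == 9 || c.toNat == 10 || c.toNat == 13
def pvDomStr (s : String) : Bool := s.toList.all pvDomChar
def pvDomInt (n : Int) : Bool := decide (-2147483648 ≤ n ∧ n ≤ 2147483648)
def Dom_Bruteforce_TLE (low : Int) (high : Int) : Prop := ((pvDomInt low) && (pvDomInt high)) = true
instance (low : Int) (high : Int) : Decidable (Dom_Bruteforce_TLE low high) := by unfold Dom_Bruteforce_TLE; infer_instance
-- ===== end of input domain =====

-- B replaces A's scan of every integer in [low, high] by filtering the 46 constant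
-- sequential-digit candidates (digits 0..9 and substrings of "123456789"): asymptotically faster.


-- ===== PORT A =====
-- int(c) for a single char; Python raises ValueError on a non-digit char (the '-' of a
-- negative number) — those inputs are excluded by Pre_ below, so the default is never reached there.
def pvDigitVal (c : Char) : Int := (PySem.Int.ofChars? [c]).getD 0

-- isSD: the early-return loop over i in range(len(s)-1) is the `all` over those indices
def pvIsSD (num : Int) : Bool :=
  let s := PySem.Int.toChars num
  (List.range (s.length - 1)).all fun i =>
    pvDigitVal (s.getD (i + 1) ' ') - pvDigitVal (s.getD i ' ') == 1

def Bruteforce_TLE (low : Int) (high : Int) : List Int :=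
  (PySem.List.pyRange low (high + 1)).foldl
    (fun res n => if pvIsSD n then res ++ [n] else res) []

-- ===== PORT B =====
-- _candidates(): list(range(10)) then append int(s[i:i+L]) for L in 2..9, i in 0..9-L
def pvCandidates : List Int :=
  let s := "123456789".toList
  (PySem.List.pyRange 2 10).foldl (fun cands L =>
    (PySem.List.pyRange 0 (10 - L)).foldl (fun cands i =>
      cands ++ [(PySem.Int.ofChars? (PySem.Chars.slice s (some i) (some (i + L)))).getD 0])
      cands)
    (PySem.List.pyRange 0 10)

def Bruteforce_TLE_alt (low : Int) (high : Int) : List Int :=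
  pvCandidates.filter (fun n => decide (low ≤ n) && decide (n ≤ high))

-- ===== PRECONDITION & SPEC =====
-- A raises ValueError iff some negative n is enumerated (int('-') on str(n)); that happens
-- exactly when low < 0 and the range is non-empty. Everywhere else A returns normally.
def Pre_Bruteforce_TLE (low : Int) (high : Int) : Prop := 0 ≤ low ∨ high < low
instance (low : Int) (high : Int) : Decidable (Pre_Bruteforce_TLE low high) := by
  unfold Pre_Bruteforce_TLE; infer_instance

def pvWitness_Bruteforce_TLE : Int × Int := (0, 150)

def Spec_Bruteforce_TLE (low : Int) (high : Int) (out : List Int) : Prop :=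
  out = Bruteforce_TLE_alt low high
instance (low : Int) (high : Int) (out : List Int) : Decidable (Spec_Bruteforce_TLE low high out) := by
  unfold Spec_Bruteforce_TLE; infer_instance

-- ===== CLAIM (what is proved, stated in full; the proofs are below) =====
def Claim_equal_Bruteforce_TLE : Prop := ∀ (low : Int) (high : Int), Dom_Bruteforce_TLE low high → Pre_Bruteforce_TLE low high → Spec_Bruteforce_TLE low high (Bruteforce_TLE low high)


-- ===== LEMMAS AND PROOFS =====

-- the candidates as a Nat list (proof-side only)
def pvCN : List Nat := [0, 1, 2, 3, 4, 5, 6, 7, 8, 9, 12, 23, 34, 45, 56, 67, 78, 89, 123, 234, 345, 456, 567, 678, 789, 1234, 2345, 3456, 4567, 5678, 6789, 12345, 23456, 34567, 45678, 56789, 123456, 234567, 345678, 456789, 1234567, 2345678, 3456789, 12345678, 23456789, 123456789]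

-- "consecutive digits" as a relation on the chars of str(n)
abbrev pvS : Char → Char → Prop := fun a b => pvDigitVal b - pvDigitVal a = 1

lemma pvCandidates_eq : pvCandidates = pvCN.map (fun k => Int.ofNat k) := by decide

lemma pvCore_eq : ∀ m : Nat, ∀ f : Nat, ∀ acc : List Char, m < f →
    Nat.toDigitsCore 10 f m acc = Nat.toDigits 10 m ++ acc := by
  intro m
  induction m using Nat.strong_induction_on with
  | _ m ih =>
    intro f acc hf
    match f, hf with
    | f + 1, hf =>
      by_cases h0 : m / 10 = 0
      · simp [Nat.toDigitsCore, h0, Nat.toDigits]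
      · have h10 : 10 ≤ m := by omega
        simp only [Nat.toDigitsCore, h0, if_false]
        rw [ih (m / 10) (by omega) f _ (by omega)]
        conv_rhs => rw [Nat.toDigits]
        simp only [Nat.toDigitsCore, h0, if_false]
        rw [ih (m / 10) (by omega) m _ (by omega)]
        simp

lemma pvToDigits_small (m : Nat) (h : m < 10) : Nat.toDigits 10 m = [Nat.digitChar m] := by
  simp [Nat.toDigits, Nat.toDigitsCore, Nat.div_eq_of_lt h, Nat.mod_eq_of_lt h]

lemma pvToDigits_rec (m : Nat) (h : 10 ≤ m) :
    Nat.toDigits 10 m = Nat.toDigits 10 (m / 10) ++ [Nat.digitChar (m % 10)] := by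
  conv_lhs => rw [Nat.toDigits]
  simp only [Nat.toDigitsCore, show m / 10 ≠ 0 by omega, if_false]
  rw [pvCore_eq (m / 10) m _ (by omega)]

lemma pvToDigits_getLast? (m : Nat) :
    (Nat.toDigits 10 m).getLast? = some (Nat.digitChar (m % 10)) := by
  by_cases h : m < 10
  · rw [pvToDigits_small m h, Nat.mod_eq_of_lt h]; rfl
  · rw [pvToDigits_rec m (by omega)]; simp

lemma pvDigitVal_digitChar (d : Nat) (h : d < 10) : pvDigitVal (Nat.digitChar d) = (d : Int) := by
  interval_cases d <;> rfl

lemma pvIsSD_iff_chain (n : Int) :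
    pvIsSD n = true ↔ List.IsChain pvS (PySem.Int.toChars n) := by
  unfold pvIsSD
  simp only [List.all_eq_true, List.mem_range, beq_iff_eq]
  rw [List.isChain_iff_getElem]
  constructor
  · intro h i hi
    have := h i (by omega)
    rw [List.getD_eq_getElem _ _ (by omega), List.getD_eq_getElem _ _ (by omega)] at this
    exact this
  · intro h i hi
    rw [List.getD_eq_getElem _ _ (by omega), List.getD_eq_getElem _ _ (by omega)]
    exact h i (by omega)

lemma pvMem_chain (m : Nat) (h : m ∈ pvCN) : List.IsChain pvS (Nat.toDigits 10 m) := by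
  have H : pvCN.all (fun k => decide (List.IsChain pvS (Nat.toDigits 10 k))) = true := by decide
  simpa using List.all_eq_true.mp H m h

lemma pvSuccClosed (k : Nat) (hk : k ∈ pvCN) (h8 : k % 10 ≤ 8) :
    (10 * k + (k % 10 + 1)) ∈ pvCN := by
  have H : pvCN.all (fun k => !(decide (k % 10 ≤ 8)) || decide ((10 * k + (k % 10 + 1)) ∈ pvCN)) = true := by decide
  have := List.all_eq_true.mp H k hk
  simpa [h8] using this

lemma pvChain_mem : ∀ m : Nat, List.IsChain pvS (Nat.toDigits 10 m) → m ∈ pvCN := by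
  intro m
  induction m using Nat.strong_induction_on with
  | _ m ih =>
    intro hc
    by_cases h : m < 10
    · interval_cases m <;> decide
    · rw [pvToDigits_rec m (by omega), List.isChain_append, pvToDigits_getLast?] at hc
      obtain ⟨h1, -, h3⟩ := hc
      have hmem := ih (m / 10) (by omega) h1
      have hrel := h3 _ rfl (Nat.digitChar (m % 10)) rfl
      unfold pvS at hrel
      rw [pvDigitVal_digitChar _ (by omega), pvDigitVal_digitChar _ (by omega)] at hrel
      have h8 : (m / 10) % 10 ≤ 8 := by omega
      have hcl := pvSuccClosed (m / 10) hmem h8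
      have hm : m = 10 * (m / 10) + ((m / 10) % 10 + 1) := by omega
      rwa [hm]

lemma pvA_eq_filter (low high : Int) :
    Bruteforce_TLE low high = (PySem.List.pyRange low (high + 1)).filter pvIsSD := by
  unfold Bruteforce_TLE
  simpa using PySem.List.foldl_append_if pvIsSD id (PySem.List.pyRange low (high + 1)) []

-- ===== VERDICT (by name: the statement is the Claim_ definition above) =====
theorem Bruteforce_TLE_spec : Claim_equal_Bruteforce_TLE := by
  intro low high _ hpre
  unfold Spec_Bruteforce_TLE
  rw [pvA_eq_filter]
  unfold Bruteforce_TLE_alt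
  rw [pvCandidates_eq]
  have p1 : List.Pairwise (·<·) ((PySem.List.pyRange low (high + 1)).filter pvIsSD) :=
    (PySem.List.pairwise_lt_pyRange_one low (high + 1)).filter _
  have p2 : List.Pairwise (·<·)
      ((pvCN.map (fun k => Int.ofNat k)).filter (fun n => decide (low ≤ n) && decide (n ≤ high))) := by
    apply List.Pairwise.filter
    decide
  have hmem : ∀ x, x ∈ (PySem.List.pyRange low (high + 1)).filter pvIsSD ↔
      x ∈ (pvCN.map (fun k => Int.ofNat k)).filter (fun n => decide (low ≤ n) && decide (n ≤ high)) := by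
    intro x
    rw [List.mem_filter, List.mem_filter, PySem.List.mem_pyRange_one, List.mem_map]
    simp only [Bool.and_eq_true, decide_eq_true_eq, Int.ofNat_eq_natCast]
    constructor
    · rintro ⟨⟨hlx, hxh⟩, hsd⟩
      have hx0 : 0 ≤ x := by rcases hpre with h | h <;> omega
      have hch : List.IsChain pvS (Nat.toDigits 10 x.toNat) := by
        have := (pvIsSD_iff_chain x).mp hsd
        rwa [show PySem.Int.toChars x = Nat.toDigits 10 x.toNat by
          simp [PySem.Int.toChars, show ¬ x < 0 by omega]] at this
      exact ⟨⟨x.toNat, pvChain_mem _ hch, by omega⟩, by omega, by omega⟩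
    · rintro ⟨⟨k, hk, rfl⟩, hlk, hkh⟩
      refine ⟨⟨hlk, by omega⟩, ?_⟩
      rw [pvIsSD_iff_chain]
      rw [show PySem.Int.toChars ((k : Nat) : Int) = Nat.toDigits 10 (((k : Nat) : Int)).toNat by
        simp [PySem.Int.toChars, show ¬ ((k : Nat) : Int) < 0 by omega]]
      rw [show (((k : Nat) : Int)).toNat = k by omega]
      exact pvMem_chain k hk
  have n1 := p1.imp (fun h => ne_of_lt h)
  have n2 := p2.imp (fun h => ne_of_lt h)
  exact List.Perm.eq_of_pairwise (fun a b _ _ hab hba => by omega) p1 p2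
    ((List.perm_ext_iff_of_nodup n1 n2).mpr hmem)
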